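-- pv_equiv track=rewrite | github.com/HBNetwork/coding-dojo | Dois_Corredores.py | numero_de_voltas_versao_2
-- ===== SOURCE A (Python) =====
-- def numero_de_voltas_versao_2(dist1, dist2):
--     if dist1 > dist2:
--         maior = dist1
--     else:
--         maior = dist2
--
--     while True:
--         if maior % dist1 == 0 and maior % dist2 == 0:
--             mmc = maior
--             break
--         else:
--             maior += 1
--
--     volta1 = int(mmc / dist1)
--     volta2 = int(mmc / dist2)
--
--     return (volta1, volta2)
-- ===== SOURCE B (Python) =====
-- def numero_de_voltas_versao_2(dist1, dist2):
--     # Euclid's algorithm gives the gcd, the lcm follows in O(1),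
--     # and each lap count is an exact integer division by the distance.
--     a, b = abs(dist1), abs(dist2)
--     while b:
--         a, b = b, a % b
--     mmc = abs(dist1 * dist2) // a
--     return (mmc // dist1, mmc // dist2)
-- ===== Notes on version B (the rewrite author's own statement) =====
-- stated objective: faster
-- what changed: A searches linearly upward from max(dist1,dist2) testing every integer until it hits a common multiple; B computes the gcd with a hand-written Euclidean loop, derives the lcm, and divides it by each distance.
-- intended difference: When both distances are negative, A's upward search crosses zero and returns zero laps for each runner (or one lap each when the distances are equal in magnitude), while B returns the lap counts derived from the positive lcm, the intended meeting distance. — e.g. on numero_de_voltas_versao_2(-4, -6): A returns [0, 0], B returns [-3, -2]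
import Mathlib
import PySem

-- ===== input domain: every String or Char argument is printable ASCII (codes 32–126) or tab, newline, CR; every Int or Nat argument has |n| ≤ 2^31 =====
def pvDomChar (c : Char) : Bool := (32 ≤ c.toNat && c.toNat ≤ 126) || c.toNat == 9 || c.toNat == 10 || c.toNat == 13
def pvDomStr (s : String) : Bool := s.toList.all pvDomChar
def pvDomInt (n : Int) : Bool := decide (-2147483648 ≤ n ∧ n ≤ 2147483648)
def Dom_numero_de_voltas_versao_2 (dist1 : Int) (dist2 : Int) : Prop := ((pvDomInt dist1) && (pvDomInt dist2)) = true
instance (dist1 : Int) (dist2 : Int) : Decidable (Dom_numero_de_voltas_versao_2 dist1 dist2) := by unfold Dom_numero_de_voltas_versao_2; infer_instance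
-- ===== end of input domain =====

-- B replaces A's linear upward search for a common multiple by a Euclidean-gcd
-- loop plus exact divisions (objective: faster); on both-negative distances the
-- two return different values (see D_ below).

-- ===== PORT A =====
-- The 'while True' search: increment maior until it divides both distances. The fuel
-- only bounds the recursion: when dist1, dist2 ≠ 0, |dist1*dist2| is a common multiple
-- ≥ maior, so the fuel chosen below is never exhausted (proved in the lemmas).
def pvLoopA (d1 d2 : Int) : Nat → Int → Int
  | 0, maior => maior
  | fuel + 1, maior =>
      if PySem.Int.mod maior d1 = 0 ∧ PySem.Int.mod maior d2 = 0 then maior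
      else pvLoopA d1 d2 fuel (maior + 1)

def numero_de_voltas_versao_2 (dist1 : Int) (dist2 : Int) : List Int :=
  let maior : Int := if dist1 > dist2 then dist1 else dist2
  let mmc : Int := pvLoopA dist1 dist2 ((|dist1 * dist2| - maior).toNat + 1) maior
  -- int(mmc / distX): distX divides mmc, so the float quotient is that exact integer
  -- and int(...) truncation returns it; PySem.Int.truncdiv is the designated primitive
  [PySem.Int.truncdiv mmc dist1, PySem.Int.truncdiv mmc dist2]

-- ===== PORT B =====
-- 'a, b = abs(dist1), abs(dist2); while b: a, b = b, a % b' — b strictly decreases,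
-- so |dist2| + 1 iterations always suffice (the fuel is never exhausted).
def pvGcdLoop : Nat → Int → Int → Int
  | 0, a, _ => a
  | fuel + 1, a, b => if b = 0 then a else pvGcdLoop fuel b (PySem.Int.mod a b)

def numero_de_voltas_versao_2_alt (dist1 : Int) (dist2 : Int) : List Int :=
  let g : Int := pvGcdLoop (dist2.natAbs + 1) |dist1| |dist2|
  let mmc : Int := PySem.Int.floordiv |dist1 * dist2| g
  [PySem.Int.floordiv mmc dist1, PySem.Int.floordiv mmc dist2]

-- ===== PRECONDITION & SPEC =====
-- A raises ZeroDivisionError when either distance is 0 (so does B); nothing else is excluded.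
def Pre_numero_de_voltas_versao_2 (dist1 : Int) (dist2 : Int) : Prop := dist1 ≠ 0 ∧ dist2 ≠ 0
instance (dist1 : Int) (dist2 : Int) : Decidable (Pre_numero_de_voltas_versao_2 dist1 dist2) := by unfold Pre_numero_de_voltas_versao_2; infer_instance
def pvWitness_numero_de_voltas_versao_2 : Int × Int := (4, 6)

-- When both distances are negative, A's upward search crosses zero and returns zero laps
-- for each runner (or one lap each when the distances are equal in magnitude), while B
-- returns the lap counts derived from the positive lcm, the intended meeting distance.
def D_numero_de_voltas_versao_2 (dist1 : Int) (dist2 : Int) : Prop := dist1 < 0 ∧ dist2 < 0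
instance (dist1 : Int) (dist2 : Int) : Decidable (D_numero_de_voltas_versao_2 dist1 dist2) := by unfold D_numero_de_voltas_versao_2; infer_instance

def Spec_numero_de_voltas_versao_2 (dist1 : Int) (dist2 : Int) (out : List Int) : Prop := ¬ D_numero_de_voltas_versao_2 dist1 dist2 → out = numero_de_voltas_versao_2_alt dist1 dist2
instance (dist1 : Int) (dist2 : Int) (out : List Int) : Decidable (Spec_numero_de_voltas_versao_2 dist1 dist2 out) := by unfold Spec_numero_de_voltas_versao_2; infer_instance

def pvDiffWitness_numero_de_voltas_versao_2 : Int × Int := (-4, -6)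
def pvDiffWitnessOut_numero_de_voltas_versao_2 : (List Int) × (List Int) := ([0, 0], [-3, -2])

-- ===== CLAIM (what is proved, stated in full; the proofs are below) =====
def Claim_unchanged_numero_de_voltas_versao_2 : Prop := ∀ (dist1 : Int) (dist2 : Int), Dom_numero_de_voltas_versao_2 dist1 dist2 → Pre_numero_de_voltas_versao_2 dist1 dist2 → Spec_numero_de_voltas_versao_2 dist1 dist2 (numero_de_voltas_versao_2 dist1 dist2)
def Claim_changed_numero_de_voltas_versao_2 : Prop := Dom_numero_de_voltas_versao_2 (pvDiffWitness_numero_de_voltas_versao_2.1) (pvDiffWitness_numero_de_voltas_versao_2.2) ∧ Pre_numero_de_voltas_versao_2 (pvDiffWitness_numero_de_voltas_versao_2.1) (pvDiffWitness_numero_de_voltas_versao_2.2) ∧ D_numero_de_voltas_versao_2 (pvDiffWitness_numero_de_voltas_versao_2.1) (pvDiffWitness_numero_de_voltas_versao_2.2) ∧ numero_de_voltas_versao_2 (pvDiffWitness_numero_de_voltas_versao_2.1) (pvDiffWitness_numero_de_voltas_versao_2.2) = pvDiffWitnessOut_numero_de_voltas_versao_2.1 ∧ numero_de_voltas_versao_2_alt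 (pvDiffWitness_numero_de_voltas_versao_2.1) (pvDiffWitness_numero_de_voltas_versao_2.2) = pvDiffWitnessOut_numero_de_voltas_versao_2.2 ∧ pvDiffWitnessOut_numero_de_voltas_versao_2.1 ≠ pvDiffWitnessOut_numero_de_voltas_versao_2.2
def Claim_exact_numero_de_voltas_versao_2 : Prop := ∀ (dist1 : Int) (dist2 : Int), Dom_numero_de_voltas_versao_2 dist1 dist2 → Pre_numero_de_voltas_versao_2 dist1 dist2 → D_numero_de_voltas_versao_2 dist1 dist2 → numero_de_voltas_versao_2 dist1 dist2 ≠ numero_de_voltas_versao_2_alt dist1 dist2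

-- ===== LEMMAS AND PROOFS =====

-- The Euclidean loop computes the gcd (on nonnegative arguments, with enough fuel).
lemma pvGcdLoop_eq (fuel : Nat) : ∀ (a b : Int), 0 ≤ a → 0 ≤ b → b.natAbs < fuel →
    pvGcdLoop fuel a b = (Int.gcd a b : Int) := by
  induction fuel with
  | zero => intro a b _ _ h; exact absurd h (Nat.not_lt_zero _)
  | succ n ih =>
    intro a b ha hb hfuel
    by_cases h0 : b = 0
    · subst h0
      simp [pvGcdLoop, Int.gcd, Int.natAbs_of_nonneg ha]
    · have hbpos : 0 < b := lt_of_le_of_ne hb (Ne.symm h0)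
      have hmod : PySem.Int.mod a b = a % b := PySem.Int.mod_eq_emod_of_pos hbpos
      have h1 : 0 ≤ a % b := Int.emod_nonneg a h0
      have h2 : a % b < b := Int.emod_lt_of_pos a hbpos
      have h3 : (a % b).natAbs < n := by omega
      simp only [pvGcdLoop, if_neg h0, hmod, ih b (a % b) hb h1 h3]
      congr 1
      have hab : (a % b).natAbs = a.natAbs % b.natAbs := by
        have e : a % b = ((a.natAbs % b.natAbs : Nat) : Int) := by
          rw [Int.natCast_mod, Int.natAbs_of_nonneg ha, Int.natAbs_of_nonneg hb]
        rw [e, Int.natAbs_natCast]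
      simp only [Int.gcd, hab]
      rw [Nat.gcd_comm b.natAbs, ← Nat.gcd_rec, Nat.gcd_comm]

-- A's search loop returns t when t is the least point ≥ maior divisible by both
-- d1 and d2 and the fuel covers the distance from maior to t.
lemma pvLoopA_eq (d1 d2 : Int) (fuel : Nat) : ∀ (maior t : Int),
    d1 ∣ t → d2 ∣ t → maior ≤ t →
    (∀ x : Int, maior ≤ x → x < t → ¬(d1 ∣ x ∧ d2 ∣ x)) →
    (t - maior).toNat < fuel →
    pvLoopA d1 d2 fuel maior = t := by
  induction fuel with
  | zero => intro maior t _ _ _ _ h; exact absurd h (Nat.not_lt_zero _)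
  | succ n ih =>
    intro maior t h1 h2 hle hmin hfuel
    by_cases hc : PySem.Int.mod maior d1 = 0 ∧ PySem.Int.mod maior d2 = 0
    · have hdvd : d1 ∣ maior ∧ d2 ∣ maior :=
        ⟨(PySem.Int.mod_eq_zero_iff_dvd maior d1).mp hc.1,
         (PySem.Int.mod_eq_zero_iff_dvd maior d2).mp hc.2⟩
      have hnl : ¬ maior < t := fun hlt => hmin maior le_rfl hlt hdvd
      have heq : maior = t := le_antisymm hle (by omega)
      simp only [pvLoopA]
      rw [if_pos hc]
      exact heq
    · have hne : maior ≠ t := by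
        intro h; subst h
        exact hc ⟨(PySem.Int.mod_eq_zero_iff_dvd _ _).mpr h1,
                  (PySem.Int.mod_eq_zero_iff_dvd _ _).mpr h2⟩
      simp only [pvLoopA, if_neg hc]
      exact ih (maior + 1) t h1 h2 (by omega)
        (fun x hx hxt => hmin x (by omega) hxt) (by omega)

-- Shared computations: the gcd loop yields the gcd, the floordiv yields the lcm.
lemma pvB_lcm (d1 d2 : Int) (h1 : d1 ≠ 0) (_h2 : d2 ≠ 0) :
    PySem.Int.floordiv |d1 * d2| (pvGcdLoop (d2.natAbs + 1) |d1| |d2|) = (Int.lcm d1 d2 : Int) := by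
  have hg : pvGcdLoop (d2.natAbs + 1) |d1| |d2| = (Int.gcd d1 d2 : Int) := by
    rw [pvGcdLoop_eq (d2.natAbs + 1) |d1| |d2| (abs_nonneg d1) (abs_nonneg d2)
          (by rw [Int.natAbs_abs]; omega)]
    simp [Int.gcd, Int.natAbs_abs]
  have hgpos : (0:Int) < (Int.gcd d1 d2 : Int) := by
    exact_mod_cast Int.gcd_pos_iff.mpr (Or.inl h1)
  have habs : |d1 * d2| = ((Int.gcd d1 d2 * Int.lcm d1 d2 : Nat) : Int) := by
    rw [Int.abs_eq_natAbs, Int.natAbs_mul]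
    exact_mod_cast (Nat.gcd_mul_lcm d1.natAbs d2.natAbs).symm
  rw [hg, PySem.Int.floordiv_eq_ediv_of_pos hgpos, habs]
  push_cast
  exact Int.mul_ediv_cancel_left _ (ne_of_gt hgpos)

lemma pvL_pos (d1 d2 : Int) (h1 : d1 ≠ 0) (h2 : d2 ≠ 0) : (0:Int) < (Int.lcm d1 d2 : Int) := by
  have hnz : Int.lcm d1 d2 ≠ 0 :=
    Nat.lcm_ne_zero (Int.natAbs_ne_zero.mpr h1) (Int.natAbs_ne_zero.mpr h2)
  exact_mod_cast Nat.pos_of_ne_zero hnz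

lemma pvL_ge_abs (d1 d2 : Int) (h1 : d1 ≠ 0) (h2 : d2 ≠ 0) :
    |d1| ≤ (Int.lcm d1 d2 : Int) ∧ |d2| ≤ (Int.lcm d1 d2 : Int) := by
  have g1 : d1 ∣ (Int.lcm d1 d2 : Int) := Int.dvd_lcm_left d1 d2
  have g2 : d2 ∣ (Int.lcm d1 d2 : Int) := Int.dvd_lcm_right d1 d2
  have hp := pvL_pos d1 d2 h1 h2
  exact ⟨Int.le_of_dvd hp ((abs_dvd _ _).mpr g1), Int.le_of_dvd hp ((abs_dvd _ _).mpr g2)⟩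

-- ===== VERDICT (by name: the statements are the Claim_ definitions above) =====
theorem numero_de_voltas_versao_2_spec : Claim_unchanged_numero_de_voltas_versao_2 := by
  intro d1 d2 _ hpre hnd
  obtain ⟨h1, h2⟩ := hpre
  simp only [numero_de_voltas_versao_2, numero_de_voltas_versao_2_alt]
  rw [pvB_lcm d1 d2 h1 h2]
  set L : Int := (Int.lcm d1 d2 : Int) with hLdef
  have hLpos : 0 < L := pvL_pos d1 d2 h1 h2
  have hd1L : d1 ∣ L := Int.dvd_lcm_left d1 d2
  have hd2L : d2 ∣ L := Int.dvd_lcm_right d1 d2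
  set m : Int := if d1 > d2 then d1 else d2 with hmdef
  -- not both negative (¬D_), so the larger distance is positive
  have hmpos : 0 < m := by
    unfold D_numero_de_voltas_versao_2 at hnd
    rw [hmdef]; split_ifs with h <;> omega
  have hge := pvL_ge_abs d1 d2 h1 h2
  have hmL : m ≤ L := by
    have e1 : d1 ≤ |d1| := le_abs_self d1
    have e2 : d2 ≤ |d2| := le_abs_self d2
    rw [hmdef]; split_ifs <;> omega
  have hmin : ∀ x : Int, m ≤ x → x < L → ¬(d1 ∣ x ∧ d2 ∣ x) := by
    rintro x hmx hxL ⟨hx1, hx2⟩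
    have hLx : L ∣ x := by rw [hLdef, Int.coe_lcm]; exact lcm_dvd hx1 hx2
    have hxpos : 0 < x := lt_of_lt_of_le hmpos hmx
    have := Int.le_of_dvd hxpos hLx
    omega
  have hLle : L ≤ |d1 * d2| := by
    have hdv : L ∣ |d1 * d2| := by
      rw [dvd_abs, hLdef, Int.coe_lcm]
      exact lcm_dvd (dvd_mul_right d1 d2) (dvd_mul_left d2 d1)
    exact Int.le_of_dvd (abs_pos.mpr (mul_ne_zero h1 h2)) hdv
  have hloop : pvLoopA d1 d2 ((|d1 * d2| - m).toNat + 1) m = L :=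
    pvLoopA_eq d1 d2 _ m L hd1L hd2L hmL hmin (by omega)
  rw [hloop]
  simp only [PySem.Int.truncdiv, PySem.Int.floordiv]
  rw [Int.tdiv_eq_ediv_of_dvd hd1L, Int.tdiv_eq_ediv_of_dvd hd2L,
      Int.fdiv_eq_ediv_of_dvd hd1L, Int.fdiv_eq_ediv_of_dvd hd2L]

theorem numero_de_voltas_versao_2_changed : Claim_changed_numero_de_voltas_versao_2 := by
  unfold Claim_changed_numero_de_voltas_versao_2; decide

theorem numero_de_voltas_versao_2_tight : Claim_exact_numero_de_voltas_versao_2 := by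
  intro d1 d2 _ hpre hD
  obtain ⟨h1, h2⟩ := hpre
  obtain ⟨hn1, hn2⟩ := hD
  simp only [numero_de_voltas_versao_2, numero_de_voltas_versao_2_alt]
  rw [pvB_lcm d1 d2 h1 h2]
  set L : Int := (Int.lcm d1 d2 : Int) with hLdef
  have hLpos : 0 < L := pvL_pos d1 d2 h1 h2
  have hd1L : d1 ∣ L := Int.dvd_lcm_left d1 d2
  have hd2L : d2 ∣ L := Int.dvd_lcm_right d1 d2
  have hge := pvL_ge_abs d1 d2 h1 h2
  set m : Int := if d1 > d2 then d1 else d2 with hmdef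
  have hmneg : m < 0 := by rw [hmdef]; split_ifs <;> omega
  have hmge : -L ≤ m := by
    have e1 : -|d1| ≤ d1 := neg_abs_le d1
    have e2 : -|d2| ≤ d2 := neg_abs_le d2
    rw [hmdef]; split_ifs <;> omega
  -- B's first lap count is negative
  have hB1 : PySem.Int.floordiv L d1 < 0 := by
    have hq : L / d1 * d1 = L := Int.ediv_mul_cancel hd1L
    simp only [PySem.Int.floordiv]
    rw [Int.fdiv_eq_ediv_of_dvd hd1L]
    by_contra hq0
    push Not at hq0
    nlinarith
  have habs0 : (0:Int) ≤ |d1 * d2| := abs_nonneg _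
  by_cases hdm : L ∣ m
  · -- maior itself is a common multiple: A returns it; its lap count is positive
    have hd1m : d1 ∣ m := hd1L.trans hdm
    have hd2m : d2 ∣ m := hd2L.trans hdm
    have hloop : pvLoopA d1 d2 ((|d1 * d2| - m).toNat + 1) m = m :=
      pvLoopA_eq d1 d2 _ m m hd1m hd2m le_rfl (fun x hx hx' _ => by omega) (by omega)
    rw [hloop]
    have hA1 : 0 < PySem.Int.truncdiv m d1 := by
      have hq : m / d1 * d1 = m := Int.ediv_mul_cancel hd1m
      simp only [PySem.Int.truncdiv]
      rw [Int.tdiv_eq_ediv_of_dvd hd1m]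
      by_contra hq0
      push Not at hq0
      nlinarith
    intro h
    injection h with ha _
    omega
  · -- the search crosses zero: A returns 0 and lap count 0
    have hmin : ∀ x : Int, m ≤ x → x < 0 → ¬(d1 ∣ x ∧ d2 ∣ x) := by
      rintro x hmx hx0 ⟨hx1, hx2⟩
      have hLx : L ∣ x := by rw [hLdef, Int.coe_lcm]; exact lcm_dvd hx1 hx2
      have hnx : 0 < -x := by omega
      have hle : L ≤ -x := Int.le_of_dvd hnx (dvd_neg.mpr hLx)
      have hxm : x = -L := by omega
      exact hdm ⟨-1, by omega⟩
    have hloop : pvLoopA d1 d2 ((|d1 * d2| - m).toNat + 1) m = 0 :=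
      pvLoopA_eq d1 d2 _ m 0 (dvd_zero d1) (dvd_zero d2) (by omega) hmin (by omega)
    rw [hloop]
    have hA1 : PySem.Int.truncdiv 0 d1 = 0 := by
      simp [PySem.Int.truncdiv]
    intro h
    injection h with ha _
    omega
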